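-- pv_equiv track=rewrite | github.com/sonoransun/rydbergtrampoline | rydberg_trampoline/conventions.py | neel_bitstring
-- ===== SOURCE A (Python) =====
-- def neel_bitstring(N: int, phase: int = 0) -> int:
--     """Return the integer index of the Néel product state.
--
--     ``phase = 0`` gives the *false vacuum* with even sites occupied:
--     n = (1, 0, 1, 0, …). ``phase = 1`` gives the opposite phase
--     (the *true vacuum* for Δ_l > 0).
--
--     Site 0 sits in the least-significant bit (see module docstring).
--     """
--     if phase not in (0, 1):
--         raise ValueError("phase must be 0 (false vacuum) or 1 (true vacuum)")
--     bits = 0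
--     for j in range(N):
--         if (j + phase) % 2 == 0:
--             bits |= 1 << j
--     return bits
-- ===== SOURCE B (Python) =====
-- def neel_bitstring(N: int, phase: int = 0) -> int:
--     """Closed-form Neel index: geometric-series bitmask instead of a bit loop."""
--     if phase not in (0, 1):
--         raise ValueError("phase must be 0 (false vacuum) or 1 (true vacuum)")
--     if N <= 0:
--         return 0
--     m = (N + 1 - phase) // 2          # number of occupied sites
--     return ((4 ** m - 1) // 3) << phase
-- ===== Notes on version B (the rewrite author's own statement) =====
-- stated objective: faster
-- what changed: Replaces the per-site loop that ORs 1<<j for alternating j with a closed-form geometric-series bitmask ((4**m-1)//3)<<phase, m the count of occupied sites.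
import Mathlib
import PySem

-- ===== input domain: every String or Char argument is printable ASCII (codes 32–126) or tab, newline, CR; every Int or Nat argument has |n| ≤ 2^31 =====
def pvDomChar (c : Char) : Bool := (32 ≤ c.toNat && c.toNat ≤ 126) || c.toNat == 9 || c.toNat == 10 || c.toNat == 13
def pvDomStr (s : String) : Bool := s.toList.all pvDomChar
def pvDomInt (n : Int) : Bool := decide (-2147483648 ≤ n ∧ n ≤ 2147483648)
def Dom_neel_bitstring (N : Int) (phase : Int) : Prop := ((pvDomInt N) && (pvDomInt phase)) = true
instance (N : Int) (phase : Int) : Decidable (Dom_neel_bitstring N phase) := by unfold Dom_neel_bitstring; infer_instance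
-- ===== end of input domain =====

-- B computes the Néel bitmask by a closed-form geometric series instead of A's per-site OR loop (faster in a timing run).
-- ===== PORT A =====
-- the `raise ValueError` branch for phase ∉ {0,1} is excluded by Pre_; the loop below is A's code verbatim.
-- `1 << j` has j ≥ 0 (from range(N)), so `j.toNat` is exact.
def neel_bitstring (N : Int) (phase : Int) : Int :=
  (PySem.List.pyRange 0 N 1).foldl
    (fun bits j =>
      if PySem.Int.mod (j + phase) 2 = 0 then PySem.Int.bor bits ((1:Int) <<< j.toNat) else bits) 0

-- ===== PORT B =====
-- `4 ** m` has m ≥ 0 (N ≥ 1, phase ≤ 1), and `<< phase` has phase ∈ {0,1}, so the .toNat's are exact.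
def neel_bitstring_alt (N : Int) (phase : Int) : Int :=
  if N ≤ 0 then 0
  else
    let m := PySem.Int.floordiv (N + 1 - phase) 2
    (PySem.Int.floordiv ((4:Int) ^ m.toNat - 1) 3) <<< phase.toNat

-- ===== PRECONDITION & SPEC =====
-- Pre_ excludes exactly the inputs where A raises ValueError (phase outside {0, 1}); B raises there too.
def Pre_neel_bitstring (N : Int) (phase : Int) : Prop := phase = 0 ∨ phase = 1
instance (N : Int) (phase : Int) : Decidable (Pre_neel_bitstring N phase) := by unfold Pre_neel_bitstring; infer_instance
def pvWitness_neel_bitstring : Int × Int := (5, 0)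

def Spec_neel_bitstring (N : Int) (phase : Int) (out : Int) : Prop := out = neel_bitstring_alt N phase
instance (N : Int) (phase : Int) (out : Int) : Decidable (Spec_neel_bitstring N phase out) := by unfold Spec_neel_bitstring; infer_instance

-- ===== CLAIM (what is proved, stated in full; the proofs are below) =====
def Claim_equal_neel_bitstring : Prop := ∀ (N : Int) (phase : Int), Dom_neel_bitstring N phase → Pre_neel_bitstring N phase → Spec_neel_bitstring N phase (neel_bitstring N phase)

-- ===== LEMMAS AND PROOFS =====

-- closed forms, over Nat: value of the Néel mask for n sites at phase 0 / phase 1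
def cf0 (n : Nat) : Nat := (4 ^ ((n + 1) / 2) - 1) / 3
def cf1 (n : Nat) : Nat := 2 * ((4 ^ (n / 2) - 1) / 3)

theorem pow4_mod3 (k : Nat) : ∃ t, 4 ^ k = 3 * t + 1 := by
  induction k with
  | zero => exact ⟨0, rfl⟩
  | succ k ih =>
    obtain ⟨t, ht⟩ := ih
    exact ⟨4 * t + 1, by rw [pow_succ, ht]; ring⟩

theorem lorPow (n : Nat) : ∀ a : Nat, a < 2 ^ n → a ||| 2 ^ n = a + 2 ^ n := by
  induction n with
  | zero =>
    intro a h
    interval_cases a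
    decide
  | succ n ih =>
    intro a h
    have hbit : Nat.bit (a.testBit 0) (a >>> 1) = a := Nat.bit_testBit_zero_shiftRight_one a
    have hpow : (2:Nat) ^ (n+1) = Nat.bit false (2 ^ n) := by simp [Nat.bit]; ring
    have hlt : a >>> 1 < 2 ^ n := by
      simp only [Nat.shiftRight_succ, Nat.shiftRight_zero]
      omega
    calc a ||| 2 ^ (n+1)
        = Nat.bit (a.testBit 0) (a >>> 1) ||| Nat.bit false (2 ^ n) := by rw [hbit, hpow]
      _ = Nat.bit (a.testBit 0 || false) ((a >>> 1) ||| 2 ^ n) := Nat.lor_bit _ _ _ _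
      _ = Nat.bit (a.testBit 0) ((a >>> 1) + 2 ^ n) := by rw [ih _ hlt, Bool.or_false]
      _ = a + 2 ^ (n+1) := by
          have hsr : a >>> 1 = a / 2 := Nat.shiftRight_one a
          have hb2 : a.testBit 0 = decide (a % 2 = 1) := Nat.testBit_zero a
          rw [hsr, hb2]
          rcases Nat.mod_two_eq_zero_or_one a with hm | hm <;>
            simp only [Nat.bit, hm, pow_succ] <;> norm_num <;> omega

theorem two_pow_two_mul (k : Nat) : 2 ^ (2 * k) = 4 ^ k := by
  rw [pow_mul]; norm_num

theorem cf0_bound (n : Nat) : cf0 n < 2 ^ n := by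
  rcases Nat.even_or_odd n with ⟨k, hk⟩ | ⟨k, hk⟩
  · subst hk
    obtain ⟨t, ht⟩ := pow4_mod3 k
    have h1 : (k + k + 1) / 2 = k := by omega
    have h2 : 2 ^ (k + k) = 4 ^ k := by rw [← two_pow_two_mul]; ring_nf
    simp only [cf0, h1, h2]
    omega
  · subst hk
    obtain ⟨t, ht⟩ := pow4_mod3 k
    have h1 : (2 * k + 1 + 1) / 2 = k + 1 := by omega
    have h2 : 2 ^ (2 * k + 1) = 2 * 4 ^ k := by rw [pow_succ, two_pow_two_mul]; ring
    have h3 : (4:Nat) ^ (k + 1) = 4 * 4 ^ k := by rw [pow_succ]; ring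
    simp only [cf0, h1, h2, h3]
    omega

theorem cf1_bound (n : Nat) : cf1 n < 2 ^ n ∨ n = 0 := by
  rcases Nat.eq_zero_or_pos n with h | h
  · exact Or.inr h
  left
  rcases Nat.even_or_odd n with ⟨k, hk⟩ | ⟨k, hk⟩
  · subst hk
    obtain ⟨t, ht⟩ := pow4_mod3 k
    have h1 : (k + k) / 2 = k := by omega
    have h2 : 2 ^ (k + k) = 4 ^ k := by rw [← two_pow_two_mul]; ring_nf
    simp only [cf1, h1, h2]
    omega
  · subst hk
    obtain ⟨t, ht⟩ := pow4_mod3 k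
    have h1 : (2 * k + 1) / 2 = k := by omega
    have h2 : 2 ^ (2 * k + 1) = 2 * 4 ^ k := by rw [pow_succ, two_pow_two_mul]; ring
    simp only [cf1, h1, h2]
    omega

theorem cf0_step (n : Nat) : cf0 (n + 1) = cf0 n + (if n % 2 = 0 then 2 ^ n else 0) := by
  rcases Nat.even_or_odd n with ⟨k, hk⟩ | ⟨k, hk⟩
  · subst hk
    obtain ⟨t, ht⟩ := pow4_mod3 k
    have hm : (k + k) % 2 = 0 := by omega
    rw [if_pos hm]
    have h1 : (k + k + 1) / 2 = k := by omega
    have h1' : (k + k + 1 + 1) / 2 = k + 1 := by omega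
    simp only [cf0, h1, h1']
    have h2 : 2 ^ (k + k) = 4 ^ k := by rw [← two_pow_two_mul]; ring_nf
    have h3 : (4:Nat) ^ (k + 1) = 4 * 4 ^ k := by rw [pow_succ]; ring
    omega
  · subst hk
    have hm : ¬ ((2 * k + 1) % 2 = 0) := by omega
    rw [if_neg hm]
    have h1 : (2 * k + 1 + 1) / 2 = k + 1 := by omega
    have h1' : (2 * k + 1 + 1 + 1) / 2 = k + 1 := by omega
    simp only [cf0, h1, h1']
    omega

theorem cf1_step (n : Nat) : cf1 (n + 1) = cf1 n + (if (n + 1) % 2 = 0 then 2 ^ n else 0) := by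
  rcases Nat.even_or_odd n with ⟨k, hk⟩ | ⟨k, hk⟩
  · subst hk
    have hm : ¬ ((k + k + 1) % 2 = 0) := by omega
    rw [if_neg hm]
    have h1 : (k + k) / 2 = k := by omega
    have h1' : (k + k + 1) / 2 = k := by omega
    simp only [cf1, h1, h1']
    omega
  · subst hk
    obtain ⟨t, ht⟩ := pow4_mod3 k
    have hm : (2 * k + 1 + 1) % 2 = 0 := by omega
    rw [if_pos hm]
    have h1 : (2 * k + 1) / 2 = k := by omega
    have h1' : (2 * k + 1 + 1) / 2 = k + 1 := by omega
    simp only [cf1, h1, h1']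
    have h2 : 2 ^ (2 * k + 1) = 2 * 4 ^ k := by rw [pow_succ, two_pow_two_mul]; ring
    have h3 : (4:Nat) ^ (k + 1) = 4 * 4 ^ k := by rw [pow_succ]; ring
    rw [h2, h3]
    omega

-- the OR step of A's loop is addition of a fresh high bit
theorem bor_fresh (a n : Nat) (h : a < 2 ^ n) :
    PySem.Int.bor (a : Int) ((1:Int) <<< n) = ((a + 2 ^ n : Nat) : Int) := by
  have h1 : (1:Int) <<< n = ((2 ^ n : Nat) : Int) := by
    rw [Int.shiftLeft_eq]; push_cast; ring
  rw [h1, PySem.Int.bor_natCast, lorPow n a h]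

-- A's loop value after n iterations, phase 0
theorem A_phase0 (n : Nat) : neel_bitstring (n : Int) 0 = (cf0 n : Int) := by
  induction n with
  | zero => simp [neel_bitstring, PySem.List.pyRange_one_eq_nil, cf0]
  | succ n ih =>
    unfold neel_bitstring at ih ⊢
    have hc : ((n + 1 : Nat) : Int) = (n : Int) + 1 := by push_cast; ring
    rw [hc, PySem.List.pyRange_one_succ_right (by positivity), List.foldl_append, ih]
    simp only [List.foldl_cons, List.foldl_nil, add_zero, Int.toNat_natCast]
    have hmod : PySem.Int.mod (n : Int) 2 = ((n % 2 : Nat) : Int) :=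
      by exact_mod_cast PySem.Int.mod_natCast n 2
    by_cases h : n % 2 = 0
    · rw [if_pos (by rw [hmod, h]; rfl), bor_fresh _ _ (cf0_bound n), cf0_step, if_pos h]
    · rw [if_neg (by rw [hmod]; exact_mod_cast fun hx => h (by exact_mod_cast hx)),
        cf0_step, if_neg h, add_zero]

-- A's loop value after n iterations, phase 1
theorem A_phase1 (n : Nat) : neel_bitstring (n : Int) 1 = (cf1 n : Int) := by
  induction n with
  | zero => simp [neel_bitstring, PySem.List.pyRange_one_eq_nil, cf1]
  | succ n ih =>
    unfold neel_bitstring at ih ⊢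
    have hc : ((n + 1 : Nat) : Int) = (n : Int) + 1 := by push_cast; ring
    rw [hc, PySem.List.pyRange_one_succ_right (by positivity), List.foldl_append, ih]
    simp only [List.foldl_cons, List.foldl_nil, Int.toNat_natCast]
    have hmod : PySem.Int.mod ((n : Int) + 1) 2 = (((n + 1) % 2 : Nat) : Int) := by
      have := PySem.Int.mod_natCast (n + 1) 2
      push_cast at this ⊢
      exact this
    by_cases h : (n + 1) % 2 = 0
    · have hb : cf1 n < 2 ^ n := by
        rcases cf1_bound n with hb | rfl
        · exact hb
        · omega
      rw [if_pos (by rw [hmod, h]; rfl), bor_fresh _ _ hb, cf1_step, if_pos h]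
    · rw [if_neg (by rw [hmod]; exact_mod_cast fun hx => h (by exact_mod_cast hx)),
        cf1_step, if_neg h, add_zero]

-- B's value, phase 0
theorem B_phase0 (n : Nat) : neel_bitstring_alt (n : Int) 0 = (cf0 n : Int) := by
  rcases Nat.eq_zero_or_pos n with rfl | hn
  · simp [neel_bitstring_alt, cf0]
  · unfold neel_bitstring_alt
    rw [if_neg (by exact_mod_cast by omega)]
    have hm : PySem.Int.floordiv ((n : Int) + 1 - 0) 2 = (((n + 1) / 2 : Nat) : Int) := by
      have := PySem.Int.floordiv_natCast (n + 1) 2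
      push_cast at this ⊢
      exact this
    rw [hm]
    have hs : ((4:Int) ^ ((((n + 1) / 2 : Nat) : Int)).toNat - 1) = ((4 ^ ((n + 1) / 2) - 1 : Nat) : Int) := by
      have h1 : (1:Nat) ≤ 4 ^ ((n + 1) / 2) := Nat.one_le_pow _ _ (by omega)
      rw [Int.toNat_natCast]
      push_cast [h1]
      ring
    show PySem.Int.floordiv ((4:Int) ^ ((((n + 1) / 2 : Nat) : Int)).toNat - 1) 3 <<< ((0:Int)).toNat
        = (cf0 n : Int)
    rw [hs]
    have hd : PySem.Int.floordiv (((4 ^ ((n + 1) / 2) - 1 : Nat) : Int)) 3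
        = (((4 ^ ((n + 1) / 2) - 1) / 3 : Nat) : Int) := by
      have := PySem.Int.floordiv_natCast (4 ^ ((n + 1) / 2) - 1) 3
      push_cast at this ⊢
      exact this
    rw [hd]
    simp [Int.shiftLeft_eq, cf0]

-- B's value, phase 1
theorem B_phase1 (n : Nat) : neel_bitstring_alt (n : Int) 1 = (cf1 n : Int) := by
  rcases Nat.eq_zero_or_pos n with rfl | hn
  · simp [neel_bitstring_alt, cf1]
  · unfold neel_bitstring_alt
    rw [if_neg (by exact_mod_cast by omega)]
    have hm : PySem.Int.floordiv ((n : Int) + 1 - 1) 2 = ((n / 2 : Nat) : Int) := by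
      have := PySem.Int.floordiv_natCast n 2
      push_cast at this ⊢
      simpa using this
    rw [hm]
    show PySem.Int.floordiv ((4:Int) ^ ((((n / 2 : Nat)) : Int)).toNat - 1) 3 <<< ((1:Int)).toNat
        = (cf1 n : Int)
    have hs : ((4:Int) ^ (((n / 2 : Nat) : Int)).toNat - 1) = ((4 ^ (n / 2) - 1 : Nat) : Int) := by
      have h1 : (1:Nat) ≤ 4 ^ (n / 2) := Nat.one_le_pow _ _ (by omega)
      rw [Int.toNat_natCast]
      push_cast [h1]
      ring
    rw [hs]
    have hd : PySem.Int.floordiv (((4 ^ (n / 2) - 1 : Nat) : Int)) 3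
        = (((4 ^ (n / 2) - 1) / 3 : Nat) : Int) := by
      have := PySem.Int.floordiv_natCast (4 ^ (n / 2) - 1) 3
      push_cast at this ⊢
      exact this
    rw [hd]
    have hsh : ((((4 ^ (n / 2) - 1) / 3 : Nat) : Int)) <<< ((1:Int)).toNat
        = (((4 ^ (n / 2) - 1) / 3 : Nat) : Int) * 2 := by
      rw [Int.shiftLeft_eq]; norm_num
    rw [hsh]
    simp [cf1]
    ring

-- both are 0 on N ≤ 0
theorem both_nonpos (N phase : Int) (h : N ≤ 0) :
    neel_bitstring N phase = 0 ∧ neel_bitstring_alt N phase = 0 := by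
  constructor
  · unfold neel_bitstring
    rw [PySem.List.pyRange_one_eq_nil (by omega)]
    rfl
  · unfold neel_bitstring_alt
    rw [if_pos h]

-- ===== VERDICT (by name: the statement is the Claim_ definition above) =====
theorem neel_bitstring_spec : Claim_equal_neel_bitstring := by
  intro N phase _ hpre
  unfold Spec_neel_bitstring
  rcases le_or_gt N 0 with h | h
  · obtain ⟨hA, hB⟩ := both_nonpos N phase h
    rw [hA, hB]
  · obtain ⟨n, rfl⟩ : ∃ n : Nat, N = (n : Int) := ⟨N.toNat, by omega⟩
    rcases hpre with rfl | rfl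
    · rw [A_phase0, B_phase0]
    · rw [A_phase1, B_phase1]
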